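-- pv_equiv track=rewrite | github.com/aliqasm888/zero-squares- | graph.py | separted_two
-- ===== SOURCE A (Python) =====
-- def  separted_two(a):
--     v=0
--     str=""
--     for c in range(len(a)):
--
--         if ( a[c]=='_' and v==1  ):
--             return str
--
--         if ( a[c]=='_' and v!=1 ):
--             v+=1
--         str+=a[c]
-- ===== SOURCE B (Python) =====
-- def separted_two(a):
--     i1 = a.find('_')
--     if i1 == -1:
--         return None
--     i2 = a.find('_', i1 + 1)
--     if i2 == -1:
--         return None
--     return a[:i2]
-- ===== Notes on version B (the rewrite author's own statement) =====
-- stated objective: simpler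
-- what changed: Replaces the per-character loop with its v counter and string accumulator by two str.find calls and a single slice up to the second underscore.
import Mathlib
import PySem

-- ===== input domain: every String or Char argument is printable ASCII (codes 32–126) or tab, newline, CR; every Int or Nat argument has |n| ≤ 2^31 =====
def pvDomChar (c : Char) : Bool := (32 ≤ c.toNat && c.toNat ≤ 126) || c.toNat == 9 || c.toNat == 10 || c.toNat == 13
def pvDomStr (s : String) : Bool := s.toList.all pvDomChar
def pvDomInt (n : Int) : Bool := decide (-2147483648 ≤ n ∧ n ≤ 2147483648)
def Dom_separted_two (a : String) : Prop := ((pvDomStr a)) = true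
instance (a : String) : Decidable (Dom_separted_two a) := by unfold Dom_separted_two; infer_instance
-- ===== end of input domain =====

-- B replaces A's per-character loop (counter v, string accumulator) by two find calls and one slice; objective: simpler.

-- ===== PORT A =====
-- literal port of A's for-loop: v counter, str accumulator, early return at the second '_'
def separted_twoLoop : List Char → Int → List Char → Option String
  | [], _, _ => none
  | c :: rest, v, acc =>
    if c = '_' ∧ v = 1 then some (String.ofList acc)
    else separted_twoLoop rest (if c = '_' ∧ v ≠ 1 then v + 1 else v) (acc ++ [c])

def separted_two (a : String) : Option String := separted_twoLoop a.toList 0 []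

-- ===== PORT B =====
def separted_two_alt (a : String) : Option String :=
  let i1 := PySem.Str.find a "_"
  if i1 = -1 then none
  else
    let i2 := PySem.Str.findFrom a "_" (i1 + 1)
    if i2 = -1 then none
    else some (PySem.Str.slice a none (some i2))

-- ===== PRECONDITION & SPEC =====
def Spec_separted_two (a : String) (out : Option String) : Prop := out = separted_two_alt a
instance (a : String) (out : Option String) : Decidable (Spec_separted_two a out) := by unfold Spec_separted_two; infer_instance

-- ===== CLAIM (what is proved, stated in full; the proofs are below) =====
def Claim_equal_separted_two : Prop := ∀ (a : String), Dom_separted_two a → Spec_separted_two a (separted_two a)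

-- ===== LEMMAS AND PROOFS =====

theorem singleton_prefix_iff (c : Char) (l : List Char) :
    [c] <+: l ↔ l.head? = some c := by
  cases l with
  | nil => simp
  | cons x xs =>
    constructor
    · rintro ⟨t, ht⟩; simp at ht; simp [ht.1]
    · intro h; simp at h; exact ⟨xs, by simp [h]⟩

-- if c ∈ l then l splits as takeWhile ++ c :: tail-of-dropWhile
theorem split_at_first (c : Char) (l : List Char) (h : c ∈ l) :
    l = l.takeWhile (· ≠ c) ++ c :: (l.dropWhile (· ≠ c)).tail := by
  induction l with
  | nil => simp at h
  | cons x rest ih =>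
    by_cases hx : x = c
    · subst hx; simp [List.takeWhile, List.dropWhile]
    · have hm : c ∈ rest := by
        rcases List.mem_cons.mp h with h' | h'
        · exact absurd h'.symm hx
        · exact h'
      simpa [List.takeWhile_cons, List.dropWhile_cons, hx] using congrArg (x :: ·) (ih hm)

theorem mem_singleton_infix (c : Char) (l : List Char) (h : c ∈ l) : [c] <:+: l := by
  rcases List.mem_iff_append.mp h with ⟨s, t, rfl⟩
  exact ⟨s, t, by simp⟩

-- find of a single char is the takeWhile length when the char is present
theorem find_singleton (c : Char) (l : List Char) (h : c ∈ l) :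
    PySem.Chars.find l [c] = ((l.takeWhile (· ≠ c)).length : Int) := by
  have hinf : [c] <:+: l := mem_singleton_infix c l h
  have hnn : 0 ≤ PySem.Chars.find l [c] := (PySem.Chars.find_nonneg_iff l [c]).mpr hinf
  obtain ⟨hpre, hmin⟩ := PySem.Chars.find_spec hnn
  set j := (PySem.Chars.find l [c]).toNat with hj
  set t := l.takeWhile (· ≠ c) with ht
  have hsplit : l = t ++ c :: (l.dropWhile (· ≠ c)).tail := split_at_first c l h
  -- prefix holds at t.length
  have hpre_t : [c] <+: l.drop t.length := by
    rw [singleton_prefix_iff]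
    conv_lhs => rw [hsplit]
    simp
  -- no prefix before t.length
  have hnot : ∀ i < t.length, ¬ [c] <+: l.drop i := by
    intro i hi hp
    rw [singleton_prefix_iff] at hp
    have : l[i]? = some c := by
      rwa [List.head?_drop] at hp
    have hti : t[i]? = some c := by
      have : (t ++ c :: (l.dropWhile (· ≠ c)).tail)[i]? = some c := by rw [← hsplit]; exact this
      rwa [List.getElem?_append_left hi] at this
    have := List.mem_of_getElem? hti
    have := List.mem_takeWhile_imp this
    simp at this
  -- antisymmetry
  have hj_eq : j = t.length := by
    rcases lt_trichotomy j t.length with hlt | heq | hgt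
    · exact absurd hpre (hnot j hlt)
    · exact heq
    · exact absurd hpre_t (hmin t.length hgt)
  omega
  
-- A's loop with v = 1: returns acc ++ prefix-up-to-next-'_', or none
theorem loopA_one (l : List Char) (acc : List Char) :
    separted_twoLoop l 1 acc =
      if '_' ∈ l then some (String.ofList (acc ++ l.takeWhile (· ≠ '_'))) else none := by
  induction l generalizing acc with
  | nil => simp [separted_twoLoop]
  | cons c rest ih =>
    by_cases hc : c = '_'
    · subst hc; simp [separted_twoLoop]
    · have hc' : ¬ '_' = c := fun he => hc he.symm
      simp [separted_twoLoop, hc, hc', ih, List.append_assoc]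

-- A's loop with v = 0: skip to just past the first '_' (kept in acc), then run with v = 1
theorem loopA_zero (l : List Char) (acc : List Char) :
    separted_twoLoop l 0 acc =
      if '_' ∈ l then
        separted_twoLoop (l.dropWhile (· ≠ '_')).tail 1 (acc ++ l.takeWhile (· ≠ '_') ++ ['_'])
      else none := by
  induction l generalizing acc with
  | nil => simp [separted_twoLoop]
  | cons c rest ih =>
    by_cases hc : c = '_'
    · subst hc; simp [separted_twoLoop]
    · have hc' : ¬ '_' = c := fun he => hc he.symm
      simp [separted_twoLoop, hc, hc', ih, List.append_assoc]

-- ===== VERDICT (by name: the statement is the Claim_ definition above) =====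
theorem separted_two_spec : Claim_equal_separted_two := by
  intro a _
  unfold Spec_separted_two separted_two separted_two_alt
  set l := a.toList with hl
  simp only [PySem.Str.find_eq, PySem.Str.findFrom_eq]
  rw [show ("_" : String).toList = ['_'] from rfl, ← hl]
  by_cases h1 : '_' ∈ l
  · -- first underscore exists
    have hfind := find_singleton '_' l h1
    set t := l.takeWhile (· ≠ '_') with ht
    set m := (l.dropWhile (· ≠ '_')).tail with hm
    have hsplit : l = t ++ '_' :: m := split_at_first '_' l h1
    have hne : PySem.Chars.find l ['_'] ≠ -1 := by rw [hfind]; omega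
    rw [loopA_zero, if_pos h1, loopA_one]
    have hklen : t.length + 1 ≤ l.length := by
      conv_rhs => rw [hsplit]; simp
      omega
    have hdrop : l.drop (t.length + 1) = m := by
      conv_lhs => rw [hsplit]
      simp
    have hfrom : PySem.Chars.findFrom l ['_'] (PySem.Chars.find l ['_'] + 1) =
        if PySem.Chars.find m ['_'] = -1 then -1
        else ((t.length + 1 : Nat) : Int) + PySem.Chars.find m ['_'] := by
      rw [hfind]
      have : ((t.length : Int) + 1) = ((t.length + 1 : Nat) : Int) := by push_cast; ring
      rw [this, PySem.Chars.findFrom_natCast l ['_'] (t.length + 1) hklen, hdrop]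
    by_cases h2 : '_' ∈ m
    · -- second underscore exists
      have hfind2 := find_singleton '_' m h2
      set u := m.takeWhile (· ≠ '_') with hu
      have hne2 : PySem.Chars.find m ['_'] ≠ -1 := by rw [hfind2]; omega
      have hval : PySem.Chars.findFrom l ['_'] (PySem.Chars.find l ['_'] + 1) =
          ((t.length + 1 + u.length : Nat) : Int) := by
        rw [hfrom, if_neg hne2, hfind2]; push_cast; ring
      have hslice : PySem.Str.slice a none (some ((t.length + 1 + u.length : Nat) : Int)) =
          String.ofList (l.take (t.length + 1 + u.length)) := by
        apply String.toList_inj.mp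
        rw [PySem.Str.toList_slice, PySem.Chars.slice_eq_listSlice, ← hl,
          PySem.List.slice_to_natCast]
        simp
      rw [if_pos h2, if_neg hne, hval, if_neg (by omega), hslice]
      congr 1
      have hmsplit : m = u ++ '_' :: (m.dropWhile (· ≠ '_')).tail := split_at_first '_' m h2
      conv_rhs => rw [hsplit, hmsplit]
      have harith : t.length + 1 + u.length = t.length + (1 + u.length) := by omega
      rw [harith, List.take_append]
      simp [List.take_of_length_le, Nat.one_add, List.take_succ_cons, List.take_left']
      simp [ht, ne_eq, decide_not]
    · -- no second underscore
      have h2f : PySem.Chars.find m ['_'] = -1 :=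
        (PySem.Chars.find_eq_neg_one_iff m ['_']).mpr
          (fun hinf => h2 (by
            rcases hinf with ⟨s, tt, hst⟩
            exact hst ▸ (by simp)))
      rw [if_neg h2, if_neg hne, hfrom, if_pos h2f, if_pos rfl]
  · -- no underscore at all
    have hf : PySem.Chars.find l ['_'] = -1 :=
      (PySem.Chars.find_eq_neg_one_iff l ['_']).mpr
        (fun hinf => h1 (by
          rcases hinf with ⟨s, tt, hst⟩
          exact hst ▸ (by simp)))
    rw [loopA_zero, if_neg h1, if_pos hf]
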